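-- pv_equiv track=rewrite | github.com/KyungHwanLeeNexsol/bodam | backend/scripts/crawl_life_insurance.py | _detect_sale_status
-- ===== SOURCE A (Python) =====
-- from typing import Any
--
-- def _detect_sale_status(item: dict[str, Any]) -> str:
--     """판매 상태를 감지한다.
--
--     다양한 보험사별 판매 상태 필드명을 처리한다:
--     - saleYn: Y(판매중), N(판매중지)
--     - saleStat: 01(판매중), 02(판매중지)
--     - prdStatusCd: 01(판매중), 02(판매중지)
--     - endYn: Y(판매중지), N(판매중)
--     - saleStatus: active/inactive
--     """
--     # saleYn 패턴
--     sale_yn = item.get("saleYn", "")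
--     if sale_yn == "Y":
--         return "판매중"
--     if sale_yn == "N":
--         return "판매중지"
--
--     # saleStat / prdStatusCd 패턴
--     for key in ["saleStat", "prdStatusCd", "saleStatCd", "prodStatusCd"]:
--         val = item.get(key, "")
--         if val in ("01", "1", "Y", "active", "on"):
--             return "판매중"
--         if val in ("02", "2", "N", "inactive", "off", "end"):
--             return "판매중지"
--
--     # endYn 패턴 (Y=종료, N=판매중)
--     end_yn = item.get("endYn", "")
--     if end_yn == "Y":
--         return "판매중지"
--     if end_yn == "N":
--         return "판매중"
--
--     # 기본값: 판매중지로 처리 (이 크롤러는 판매중지 상품 수집이 목적)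
--     return "판매중지"
-- ===== SOURCE B (Python) =====
-- # Single pass over the item's own entries: each entry is classified into a
-- # (priority, on_sale) pair and the minimum-priority match wins; A instead
-- # probes a fixed sequence of keys. Same result on every dict.
--
-- _RANK = {"saleYn": 0, "saleStat": 1, "prdStatusCd": 2, "saleStatCd": 3, "prodStatusCd": 4, "endYn": 5}
--
--
-- def _classify(key, value):
--     rank = _RANK.get(key)
--     if rank is None:
--         return None
--     if rank == 0:
--         on, off = ("Y",), ("N",)
--     elif rank == 5:
--         on, off = ("N",), ("Y",)
--     else:
--         on = ("01", "1", "Y", "active", "on")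
--         off = ("02", "2", "N", "inactive", "off", "end")
--     if value in on:
--         return (rank, True)
--     if value in off:
--         return (rank, False)
--     return None
--
--
-- def _detect_sale_status(item: dict) -> str:
--     best = None
--     for key, value in item.items():
--         c = _classify(key, value)
--         if c is not None and (best is None or c[0] < best[0]):
--             best = c
--     return "판매중" if best is not None and best[1] else "판매중지"
-- ===== Notes on version B (the rewrite author's own statement) =====
-- stated objective: alternative
-- what changed: B makes one pass over the item's entries, classifying each into a (priority, on-sale) pair and keeping the minimum-priority match, instead of A's fixed sequence of per-key probes with hand-written branch chains.
import Mathlib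
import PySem

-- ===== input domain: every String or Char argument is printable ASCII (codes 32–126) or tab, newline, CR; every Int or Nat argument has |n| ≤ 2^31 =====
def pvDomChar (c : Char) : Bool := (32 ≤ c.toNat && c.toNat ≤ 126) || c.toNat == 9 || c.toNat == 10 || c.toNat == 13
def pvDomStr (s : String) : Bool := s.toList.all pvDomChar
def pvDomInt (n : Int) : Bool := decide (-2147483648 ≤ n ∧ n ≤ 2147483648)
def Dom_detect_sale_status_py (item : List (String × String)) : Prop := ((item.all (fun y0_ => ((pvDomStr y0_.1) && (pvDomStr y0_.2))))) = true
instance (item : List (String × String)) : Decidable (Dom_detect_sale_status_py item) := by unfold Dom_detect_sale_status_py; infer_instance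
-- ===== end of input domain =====

set_option maxRecDepth 8192
set_option maxHeartbeats 1000000


-- B replaces A's fixed sequence of per-key probes by a single pass over the item's own
-- entries keeping the minimum-priority classified entry (objective: alternative).

-- ===== PORT A =====
-- the for-loop over ["saleStat", "prdStatusCd", "saleStatCd", "prodStatusCd"]; some = early return
def pvALoop (item : PySem.Dict String String) : List String → Option String
  | [] => none
  | k :: ks =>
    let val := item.getD k ""
    if val ∈ ["01", "1", "Y", "active", "on"] then some "판매중"
    else if val ∈ ["02", "2", "N", "inactive", "off", "end"] then some "판매중지"
    else pvALoop item ks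

def detect_sale_status_py (item : List (String × String)) : String :=
  let d := PySem.Dict.mk item
  let sale_yn := d.getD "saleYn" ""
  if sale_yn = "Y" then "판매중"
  else if sale_yn = "N" then "판매중지"
  else
    match pvALoop d ["saleStat", "prdStatusCd", "saleStatCd", "prodStatusCd"] with
    | some r => r
    | none =>
      let end_yn := d.getD "endYn" ""
      if end_yn = "Y" then "판매중지"
      else if end_yn = "N" then "판매중"
      else "판매중지"

-- ===== PORT B =====
-- _RANK
def pvRankTable : PySem.Dict String Nat :=
  PySem.Dict.ofList [("saleYn", 0), ("saleStat", 1), ("prdStatusCd", 2),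
                     ("saleStatCd", 3), ("prodStatusCd", 4), ("endYn", 5)]

-- _classify
def pvClassify (key value : String) : Option (Nat × Bool) :=
  match pvRankTable.get? key with
  | none => none
  | some rank =>
    let p : List String × List String :=
      if rank = 0 then (["Y"], ["N"])
      else if rank = 5 then (["N"], ["Y"])
      else (["01", "1", "Y", "active", "on"], ["02", "2", "N", "inactive", "off", "end"])
    if value ∈ p.1 then some (rank, true)
    else if value ∈ p.2 then some (rank, false)
    else none

-- the loop body: keep the classification with the smallest rank (first wins ties)
def pvStep (best : Option (Nat × Bool)) (kv : String × String) : Option (Nat × Bool) :=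
  match pvClassify kv.1 kv.2 with
  | none => best
  | some c =>
    match best with
    | none => some c
    | some b => if c.1 < b.1 then some c else best

def detect_sale_status_py_alt (item : List (String × String)) : String :=
  match item.foldl pvStep none with
  | some (_, true) => "판매중"
  | _ => "판매중지"

-- ===== PRECONDITION & SPEC =====
-- Pre_ excludes association lists with duplicate keys: they do not represent any Python
-- dict (the Python function's argument), so A is never run on them.
def Pre_detect_sale_status_py (item : List (String × String)) : Prop :=
  (item.map Prod.fst).Nodup
instance (item : List (String × String)) : Decidable (Pre_detect_sale_status_py item) := by
  unfold Pre_detect_sale_status_py; infer_instance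

def pvWitness_detect_sale_status_py : (List (String × String)) :=
  [("name", "plan A"), ("saleStat", "02")]

def Spec_detect_sale_status_py (item : List (String × String)) (out : String) : Prop := out = detect_sale_status_py_alt item
instance (item : List (String × String)) (out : String) : Decidable (Spec_detect_sale_status_py item out) := by unfold Spec_detect_sale_status_py; infer_instance

-- ===== CLAIM (what is proved, stated in full; the proofs are below) =====
def Claim_equal_detect_sale_status_py : Prop := ∀ (item : List (String × String)), Dom_detect_sale_status_py item → Pre_detect_sale_status_py item → Spec_detect_sale_status_py item (detect_sale_status_py item)

-- ===== LEMMAS AND PROOFS =====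

-- lookup with default "" (what A's getD does), recursively on the list
def pvG (L : List (String × String)) (k : String) : String :=
  (PySem.Dict.mk L).getD k ""

-- min-by-rank with left tie preference: the fold's combining law
def pvMerge (x y : Option (Nat × Bool)) : Option (Nat × Bool) :=
  match x, y with
  | none, y => y
  | x, none => x
  | some a, some c => if c.1 < a.1 then some c else some a

-- A's probe cascade, as a merge chain over the six keys
def pvCasc (L : List (String × String)) : Option (Nat × Bool) :=
  pvMerge (pvClassify "saleYn" (pvG L "saleYn"))
    (pvMerge (pvClassify "saleStat" (pvG L "saleStat"))
      (pvMerge (pvClassify "prdStatusCd" (pvG L "prdStatusCd"))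
        (pvMerge (pvClassify "saleStatCd" (pvG L "saleStatCd"))
          (pvMerge (pvClassify "prodStatusCd" (pvG L "prodStatusCd"))
            (pvClassify "endYn" (pvG L "endYn"))))))

def pvRender (x : Option (Nat × Bool)) : String :=
  match x with
  | some (_, true) => "판매중"
  | _ => "판매중지"

lemma pvStep_eq_merge (best : Option (Nat × Bool)) (kv : String × String) :
    pvStep best kv = pvMerge best (pvClassify kv.1 kv.2) := by
  unfold pvStep pvMerge
  rcases h : pvClassify kv.1 kv.2 with _ | c <;> rcases best with _ | b <;> simp

lemma pvMerge_none_right (x : Option (Nat × Bool)) : pvMerge x none = x := by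
  cases x <;> rfl

lemma pvMerge_assoc (x y z : Option (Nat × Bool)) :
    pvMerge (pvMerge x y) z = pvMerge x (pvMerge y z) := by
  rcases x with _ | a
  · rfl
  rcases y with _ | b
  · cases z <;> rfl
  rcases z with _ | c
  · rw [pvMerge_none_right, pvMerge_none_right]
  by_cases h1 : b.1 < a.1 <;> by_cases h2 : c.1 < b.1 <;> by_cases h3 : c.1 < a.1 <;>
    simp only [pvMerge, h1, h2, h3, if_true, if_false] <;> first | rfl | (exfalso; omega)

lemma pvMerge_comm_ne (x y : Option (Nat × Bool))
    (h : ∀ a ∈ x, ∀ b ∈ y, a.1 ≠ b.1) : pvMerge x y = pvMerge y x := by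
  rcases x with _ | a <;> rcases y with _ | b <;> simp [pvMerge]
  have := h a rfl b rfl
  split_ifs <;> simp_all <;> omega

lemma pvMem_merge (x y : Option (Nat × Bool)) (c : Nat × Bool)
    (h : c ∈ pvMerge x y) : c ∈ x ∨ c ∈ y := by
  rcases x with _ | a <;> rcases y with _ | b <;> simp_all [pvMerge]
  split_ifs at h <;> simp_all

lemma pvClassify_rank (k : String) (r : Nat) (hr : pvRankTable.get? k = some r)
    (v : String) (c : Nat × Bool) (h : c ∈ pvClassify k v) : c.1 = r := by
  unfold pvClassify at h
  rw [hr] at h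
  simp only at h
  split_ifs at h <;> simp_all <;> simp [← h]

lemma pvG_cons (k v x : String) (t : List (String × String)) :
    pvG ((k, v) :: t) x = if k = x then v else pvG t x := by
  unfold pvG
  rw [PySem.Dict.getD_eq_get?_getD, PySem.Dict.get?_mk_cons, PySem.Dict.getD_eq_get?_getD]
  by_cases h : k = x <;> simp [h]

lemma pvG_not_mem (t : List (String × String)) (x : String)
    (hx : x ∉ t.map Prod.fst) : pvG t x = "" := by
  induction t with
  | nil => rfl
  | cons hd tl ih =>
    simp only [List.map_cons, List.mem_cons, not_or] at hx
    rw [show hd = (hd.1, hd.2) from rfl, pvG_cons, if_neg (fun h => hx.1 h.symm)]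
    exact ih hx.2

lemma pvClassify_mid (k : String) (r : Nat) (hr : pvRankTable.get? k = some r)
    (h0 : r ≠ 0) (h5 : r ≠ 5) (v : String) :
    pvClassify k v =
      if v ∈ ["01", "1", "Y", "active", "on"] then some (r, true)
      else if v ∈ ["02", "2", "N", "inactive", "off", "end"] then some (r, false)
      else none := by
  unfold pvClassify
  rw [hr]
  simp [h0, h5]

lemma pvClassify_saleYn (v : String) :
    pvClassify "saleYn" v =
      if v = "Y" then some (0, true) else if v = "N" then some (0, false) else none := by
  unfold pvClassify
  rw [show pvRankTable.get? "saleYn" = some 0 from by decide]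
  simp

lemma pvClassify_endYn (v : String) :
    pvClassify "endYn" v =
      if v = "N" then some (5, true) else if v = "Y" then some (5, false) else none := by
  unfold pvClassify
  rw [show pvRankTable.get? "endYn" = some 5 from by decide]
  simp

lemma pvMerge_none_left (y : Option (Nat × Bool)) : pvMerge none y = y := rfl

lemma pvMerge_left (a : Nat × Bool) (M : Option (Nat × Bool))
    (hM : ∀ c ∈ M, a.1 < c.1) : pvMerge (some a) M = some a := by
  rcases M with _ | c
  · rfl
  · have := hM c rfl
    simp only [pvMerge]
    rw [if_neg (by omega)]

lemma pvClassify_ne_rank {k k' : String} {r r' : Nat}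
    (hr : pvRankTable.get? k = some r) (hr' : pvRankTable.get? k' = some r')
    (hne : r ≠ r') (w w' : String) :
    ∀ a ∈ pvClassify k w, ∀ b ∈ pvClassify k' w', a.1 ≠ b.1 := fun a ha b hb => by
  rw [pvClassify_rank _ _ hr _ _ ha, pvClassify_rank _ _ hr' _ _ hb]
  exact hne

lemma pvFloat (x y M : Option (Nat × Bool)) (h : ∀ a ∈ y, ∀ b ∈ x, a.1 ≠ b.1) :
    pvMerge y (pvMerge x M) = pvMerge x (pvMerge y M) := by
  rw [← pvMerge_assoc, pvMerge_comm_ne y x h, pvMerge_assoc]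

-- the head entry of a nodup-key list merges into the cascade of the tail
lemma pvCasc_cons (k v : String) (t : List (String × String)) (hk : k ∉ t.map Prod.fst) :
    pvCasc ((k, v) :: t) = pvMerge (pvClassify k v) (pvCasc t) := by
  unfold pvCasc
  simp only [pvG_cons]
  by_cases h0 : k = "saleYn"
  · subst h0
    simp
    rw [pvG_not_mem t _ hk, show pvClassify "saleYn" "" = none from by decide, pvMerge_none_left]
  by_cases h1 : k = "saleStat"
  · subst h1
    simp
    rw [pvG_not_mem t _ hk, show pvClassify "saleStat" "" = none from by decide, pvMerge_none_left]
    rw [pvFloat (pvClassify "saleStat" v) (pvClassify "saleYn" (pvG t "saleYn")) (pvMerge (pvClassify "prdStatusCd" (pvG t "prdStatusCd")) (pvMerge (pvClassify "saleStatCd" (pvG t "saleStatCd")) (pvMerge (pvClassify "prodStatusCd" (pvG t "prodStatusCd")) (pvClassify "endYn" (pvG t "endYn"))))) (pvClassify_ne_rank (k := "saleYn") (k' := "saleStat") (r := 0) (r' := 1) (by decide) (by decide) (by decide) _ _)]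
  by_cases h2 : k = "prdStatusCd"
  · subst h2
    simp
    rw [pvG_not_mem t _ hk, show pvClassify "prdStatusCd" "" = none from by decide, pvMerge_none_left]
    rw [pvFloat (pvClassify "prdStatusCd" v) (pvClassify "saleStat" (pvG t "saleStat")) (pvMerge (pvClassify "saleStatCd" (pvG t "saleStatCd")) (pvMerge (pvClassify "prodStatusCd" (pvG t "prodStatusCd")) (pvClassify "endYn" (pvG t "endYn")))) (pvClassify_ne_rank (k := "saleStat") (k' := "prdStatusCd") (r := 1) (r' := 2) (by decide) (by decide) (by decide) _ _)]
    rw [pvFloat (pvClassify "prdStatusCd" v) (pvClassify "saleYn" (pvG t "saleYn")) (pvMerge (pvClassify "saleStat" (pvG t "saleStat")) (pvMerge (pvClassify "saleStatCd" (pvG t "saleStatCd")) (pvMerge (pvClassify "prodStatusCd" (pvG t "prodStatusCd")) (pvClassify "endYn" (pvG t "endYn"))))) (pvClassify_ne_rank (k := "saleYn") (k' := "prdStatusCd") (r := 0) (r' := 2) (by decide) (by decide) (by decide) _ _)]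
  by_cases h3 : k = "saleStatCd"
  · subst h3
    simp
    rw [pvG_not_mem t _ hk, show pvClassify "saleStatCd" "" = none from by decide, pvMerge_none_left]
    rw [pvFloat (pvClassify "saleStatCd" v) (pvClassify "prdStatusCd" (pvG t "prdStatusCd")) (pvMerge (pvClassify "prodStatusCd" (pvG t "prodStatusCd")) (pvClassify "endYn" (pvG t "endYn"))) (pvClassify_ne_rank (k := "prdStatusCd") (k' := "saleStatCd") (r := 2) (r' := 3) (by decide) (by decide) (by decide) _ _)]
    rw [pvFloat (pvClassify "saleStatCd" v) (pvClassify "saleStat" (pvG t "saleStat")) (pvMerge (pvClassify "prdStatusCd" (pvG t "prdStatusCd")) (pvMerge (pvClassify "prodStatusCd" (pvG t "prodStatusCd")) (pvClassify "endYn" (pvG t "endYn")))) (pvClassify_ne_rank (k := "saleStat") (k' := "saleStatCd") (r := 1) (r' := 3) (by decide) (by decide) (by decide) _ _)]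
    rw [pvFloat (pvClassify "saleStatCd" v) (pvClassify "saleYn" (pvG t "saleYn")) (pvMerge (pvClassify "saleStat" (pvG t "saleStat")) (pvMerge (pvClassify "prdStatusCd" (pvG t "prdStatusCd")) (pvMerge (pvClassify "prodStatusCd" (pvG t "prodStatusCd")) (pvClassify "endYn" (pvG t "endYn"))))) (pvClassify_ne_rank (k := "saleYn") (k' := "saleStatCd") (r := 0) (r' := 3) (by decide) (by decide) (by decide) _ _)]
  by_cases h4 : k = "prodStatusCd"
  · subst h4
    simp
    rw [pvG_not_mem t _ hk, show pvClassify "prodStatusCd" "" = none from by decide, pvMerge_none_left]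
    rw [pvFloat (pvClassify "prodStatusCd" v) (pvClassify "saleStatCd" (pvG t "saleStatCd")) (pvClassify "endYn" (pvG t "endYn")) (pvClassify_ne_rank (k := "saleStatCd") (k' := "prodStatusCd") (r := 3) (r' := 4) (by decide) (by decide) (by decide) _ _)]
    rw [pvFloat (pvClassify "prodStatusCd" v) (pvClassify "prdStatusCd" (pvG t "prdStatusCd")) (pvMerge (pvClassify "saleStatCd" (pvG t "saleStatCd")) (pvClassify "endYn" (pvG t "endYn"))) (pvClassify_ne_rank (k := "prdStatusCd") (k' := "prodStatusCd") (r := 2) (r' := 4) (by decide) (by decide) (by decide) _ _)]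
    rw [pvFloat (pvClassify "prodStatusCd" v) (pvClassify "saleStat" (pvG t "saleStat")) (pvMerge (pvClassify "prdStatusCd" (pvG t "prdStatusCd")) (pvMerge (pvClassify "saleStatCd" (pvG t "saleStatCd")) (pvClassify "endYn" (pvG t "endYn")))) (pvClassify_ne_rank (k := "saleStat") (k' := "prodStatusCd") (r := 1) (r' := 4) (by decide) (by decide) (by decide) _ _)]
    rw [pvFloat (pvClassify "prodStatusCd" v) (pvClassify "saleYn" (pvG t "saleYn")) (pvMerge (pvClassify "saleStat" (pvG t "saleStat")) (pvMerge (pvClassify "prdStatusCd" (pvG t "prdStatusCd")) (pvMerge (pvClassify "saleStatCd" (pvG t "saleStatCd")) (pvClassify "endYn" (pvG t "endYn"))))) (pvClassify_ne_rank (k := "saleYn") (k' := "prodStatusCd") (r := 0) (r' := 4) (by decide) (by decide) (by decide) _ _)]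
  by_cases h5 : k = "endYn"
  · subst h5
    simp
    rw [pvG_not_mem t _ hk, show pvClassify "endYn" "" = none from by decide, pvMerge_none_right]
    rw [pvMerge_comm_ne (pvClassify "prodStatusCd" (pvG t "prodStatusCd")) (pvClassify "endYn" v) (pvClassify_ne_rank (k := "prodStatusCd") (k' := "endYn") (r := 4) (r' := 5) (by decide) (by decide) (by decide) _ _)]
    rw [pvFloat (pvClassify "endYn" v) (pvClassify "saleStatCd" (pvG t "saleStatCd")) (pvClassify "prodStatusCd" (pvG t "prodStatusCd")) (pvClassify_ne_rank (k := "saleStatCd") (k' := "endYn") (r := 3) (r' := 5) (by decide) (by decide) (by decide) _ _)]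
    rw [pvFloat (pvClassify "endYn" v) (pvClassify "prdStatusCd" (pvG t "prdStatusCd")) (pvMerge (pvClassify "saleStatCd" (pvG t "saleStatCd")) (pvClassify "prodStatusCd" (pvG t "prodStatusCd"))) (pvClassify_ne_rank (k := "prdStatusCd") (k' := "endYn") (r := 2) (r' := 5) (by decide) (by decide) (by decide) _ _)]
    rw [pvFloat (pvClassify "endYn" v) (pvClassify "saleStat" (pvG t "saleStat")) (pvMerge (pvClassify "prdStatusCd" (pvG t "prdStatusCd")) (pvMerge (pvClassify "saleStatCd" (pvG t "saleStatCd")) (pvClassify "prodStatusCd" (pvG t "prodStatusCd")))) (pvClassify_ne_rank (k := "saleStat") (k' := "endYn") (r := 1) (r' := 5) (by decide) (by decide) (by decide) _ _)]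
    rw [pvFloat (pvClassify "endYn" v) (pvClassify "saleYn" (pvG t "saleYn")) (pvMerge (pvClassify "saleStat" (pvG t "saleStat")) (pvMerge (pvClassify "prdStatusCd" (pvG t "prdStatusCd")) (pvMerge (pvClassify "saleStatCd" (pvG t "saleStatCd")) (pvClassify "prodStatusCd" (pvG t "prodStatusCd"))))) (pvClassify_ne_rank (k := "saleYn") (k' := "endYn") (r := 0) (r' := 5) (by decide) (by decide) (by decide) _ _)]
  have hnone : pvRankTable.get? k = none := by
    rw [show pvRankTable = PySem.Dict.mk [("saleYn", 0), ("saleStat", 1), ("prdStatusCd", 2), ("saleStatCd", 3), ("prodStatusCd", 4), ("endYn", 5)] from by decide]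
    simp only [PySem.Dict.get?_mk_cons, beq_iff_eq]
    rw [if_neg (fun h => h0 h.symm), if_neg (fun h => h1 h.symm), if_neg (fun h => h2 h.symm), if_neg (fun h => h3 h.symm), if_neg (fun h => h4 h.symm), if_neg (fun h => h5 h.symm)]
    rfl
  rw [if_neg h0, if_neg h1, if_neg h2, if_neg h3, if_neg h4, if_neg h5,
    show pvClassify k v = none from by unfold pvClassify; rw [hnone]]
  rfl

-- fold = merge of acc with the cascade, for nodup keys
lemma pvFold_eq_casc (L : List (String × String)) (hnd : (L.map Prod.fst).Nodup) :
    ∀ acc, L.foldl pvStep acc = pvMerge acc (pvCasc L) := by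
  induction L with
  | nil =>
    intro acc
    rw [show pvCasc [] = none from by decide, pvMerge_none_right]
    rfl
  | cons hd tl ih =>
    intro acc
    simp only [List.map_cons, List.nodup_cons] at hnd
    rw [List.foldl_cons, ih hnd.2, pvStep_eq_merge,
      show hd = (hd.1, hd.2) from rfl, pvCasc_cons hd.1 hd.2 tl hnd.1,
      pvMerge_assoc]

lemma pvA_unf (L : List (String × String)) : detect_sale_status_py L =
    (if pvG L "saleYn" = "Y" then "판매중"
     else if pvG L "saleYn" = "N" then "판매중지"
     else
       match pvALoop (PySem.Dict.mk L) ["saleStat", "prdStatusCd", "saleStatCd", "prodStatusCd"] with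
       | some r => r
       | none =>
         if pvG L "endYn" = "Y" then "판매중지"
         else if pvG L "endYn" = "N" then "판매중"
         else "판매중지") := rfl

lemma pvLoop_unf (L : List (String × String)) :
    pvALoop (PySem.Dict.mk L) ["saleStat", "prdStatusCd", "saleStatCd", "prodStatusCd"] =
    (if pvG L "saleStat" ∈ ["01", "1", "Y", "active", "on"] then some "판매중"
     else if pvG L "saleStat" ∈ ["02", "2", "N", "inactive", "off", "end"] then some "판매중지"
     else if pvG L "prdStatusCd" ∈ ["01", "1", "Y", "active", "on"] then some "판매중"
     else if pvG L "prdStatusCd" ∈ ["02", "2", "N", "inactive", "off", "end"] then some "판매중지"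
     else if pvG L "saleStatCd" ∈ ["01", "1", "Y", "active", "on"] then some "판매중"
     else if pvG L "saleStatCd" ∈ ["02", "2", "N", "inactive", "off", "end"] then some "판매중지"
     else if pvG L "prodStatusCd" ∈ ["01", "1", "Y", "active", "on"] then some "판매중"
     else if pvG L "prodStatusCd" ∈ ["02", "2", "N", "inactive", "off", "end"] then some "판매중지"
     else none) := rfl

lemma pvA_eq_render_casc (L : List (String × String)) :
    detect_sale_status_py L = pvRender (pvCasc L) := by
  have t5 : ∀ c ∈ pvClassify "endYn" (pvG L "endYn"), 4 < c.1 := fun c h => by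
    rw [pvClassify_rank _ 5 (by decide) _ c h]; omega
  have t4 : ∀ c ∈ pvMerge (pvClassify "prodStatusCd" (pvG L "prodStatusCd")) (pvClassify "endYn" (pvG L "endYn")), 3 < c.1 := fun c h => by
    rcases pvMem_merge _ _ _ h with h' | h'
    · rw [pvClassify_rank _ 4 (by decide) _ c h']; omega
    · have := t5 c h'; omega
  have t3 : ∀ c ∈ pvMerge (pvClassify "saleStatCd" (pvG L "saleStatCd")) (pvMerge (pvClassify "prodStatusCd" (pvG L "prodStatusCd")) (pvClassify "endYn" (pvG L "endYn"))), 2 < c.1 := fun c h => by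
    rcases pvMem_merge _ _ _ h with h' | h'
    · rw [pvClassify_rank _ 3 (by decide) _ c h']; omega
    · have := t4 c h'; omega
  have t2 : ∀ c ∈ pvMerge (pvClassify "prdStatusCd" (pvG L "prdStatusCd")) (pvMerge (pvClassify "saleStatCd" (pvG L "saleStatCd")) (pvMerge (pvClassify "prodStatusCd" (pvG L "prodStatusCd")) (pvClassify "endYn" (pvG L "endYn")))), 1 < c.1 := fun c h => by
    rcases pvMem_merge _ _ _ h with h' | h'
    · rw [pvClassify_rank _ 2 (by decide) _ c h']; omega
    · have := t3 c h'; omega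
  have t1 : ∀ c ∈ pvMerge (pvClassify "saleStat" (pvG L "saleStat")) (pvMerge (pvClassify "prdStatusCd" (pvG L "prdStatusCd")) (pvMerge (pvClassify "saleStatCd" (pvG L "saleStatCd")) (pvMerge (pvClassify "prodStatusCd" (pvG L "prodStatusCd")) (pvClassify "endYn" (pvG L "endYn"))))), 0 < c.1 := fun c h => by
    rcases pvMem_merge _ _ _ h with h' | h'
    · rw [pvClassify_rank _ 1 (by decide) _ c h']; omega
    · have := t2 c h'; omega
  rw [pvA_unf, pvLoop_unf]
  unfold pvCasc
  by_cases hY : pvG L "saleYn" = "Y"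
  · rw [if_pos hY, pvClassify_saleYn, if_pos hY, pvMerge_left ((0 : Nat), true) _ t1]
    rfl
  rw [if_neg hY]
  by_cases hN : pvG L "saleYn" = "N"
  · rw [if_pos hN, pvClassify_saleYn, if_neg hY, if_pos hN, pvMerge_left ((0 : Nat), false) _ t1]
    rfl
  rw [if_neg hN, pvClassify_saleYn, if_neg hY, if_neg hN, pvMerge_none_left]
  by_cases h1a : pvG L "saleStat" ∈ ["01", "1", "Y", "active", "on"]
  · rw [if_pos h1a, pvClassify_mid "saleStat" 1 (by decide) (by decide) (by decide), if_pos h1a, pvMerge_left ((1 : Nat), true) _ t2]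
    rfl
  rw [if_neg h1a]
  by_cases h1b : pvG L "saleStat" ∈ ["02", "2", "N", "inactive", "off", "end"]
  · rw [if_pos h1b, pvClassify_mid "saleStat" 1 (by decide) (by decide) (by decide), if_neg h1a, if_pos h1b, pvMerge_left ((1 : Nat), false) _ t2]
    rfl
  rw [if_neg h1b, pvClassify_mid "saleStat" 1 (by decide) (by decide) (by decide), if_neg h1a, if_neg h1b, pvMerge_none_left]
  by_cases h2a : pvG L "prdStatusCd" ∈ ["01", "1", "Y", "active", "on"]
  · rw [if_pos h2a, pvClassify_mid "prdStatusCd" 2 (by decide) (by decide) (by decide), if_pos h2a, pvMerge_left ((2 : Nat), true) _ t3]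
    rfl
  rw [if_neg h2a]
  by_cases h2b : pvG L "prdStatusCd" ∈ ["02", "2", "N", "inactive", "off", "end"]
  · rw [if_pos h2b, pvClassify_mid "prdStatusCd" 2 (by decide) (by decide) (by decide), if_neg h2a, if_pos h2b, pvMerge_left ((2 : Nat), false) _ t3]
    rfl
  rw [if_neg h2b, pvClassify_mid "prdStatusCd" 2 (by decide) (by decide) (by decide), if_neg h2a, if_neg h2b, pvMerge_none_left]
  by_cases h3a : pvG L "saleStatCd" ∈ ["01", "1", "Y", "active", "on"]
  · rw [if_pos h3a, pvClassify_mid "saleStatCd" 3 (by decide) (by decide) (by decide), if_pos h3a, pvMerge_left ((3 : Nat), true) _ t4]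
    rfl
  rw [if_neg h3a]
  by_cases h3b : pvG L "saleStatCd" ∈ ["02", "2", "N", "inactive", "off", "end"]
  · rw [if_pos h3b, pvClassify_mid "saleStatCd" 3 (by decide) (by decide) (by decide), if_neg h3a, if_pos h3b, pvMerge_left ((3 : Nat), false) _ t4]
    rfl
  rw [if_neg h3b, pvClassify_mid "saleStatCd" 3 (by decide) (by decide) (by decide), if_neg h3a, if_neg h3b, pvMerge_none_left]
  by_cases h4a : pvG L "prodStatusCd" ∈ ["01", "1", "Y", "active", "on"]
  · rw [if_pos h4a, pvClassify_mid "prodStatusCd" 4 (by decide) (by decide) (by decide), if_pos h4a, pvMerge_left ((4 : Nat), true) _ t5]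
    rfl
  rw [if_neg h4a]
  by_cases h4b : pvG L "prodStatusCd" ∈ ["02", "2", "N", "inactive", "off", "end"]
  · rw [if_pos h4b, pvClassify_mid "prodStatusCd" 4 (by decide) (by decide) (by decide), if_neg h4a, if_pos h4b, pvMerge_left ((4 : Nat), false) _ t5]
    rfl
  rw [if_neg h4b, pvClassify_mid "prodStatusCd" 4 (by decide) (by decide) (by decide), if_neg h4a, if_neg h4b, pvMerge_none_left]
  by_cases h5Y : pvG L "endYn" = "Y"
  · rw [if_pos h5Y, h5Y]
    rfl
  rw [if_neg h5Y]
  by_cases h5N : pvG L "endYn" = "N"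
  · rw [if_pos h5N, h5N]
    rfl
  rw [if_neg h5N, pvClassify_endYn, if_neg h5N, if_neg h5Y]
  rfl

-- ===== VERDICT (by name: the statement is the Claim_ definition above) =====
theorem detect_sale_status_py_spec : Claim_equal_detect_sale_status_py := by
  intro item _ hpre
  unfold Spec_detect_sale_status_py detect_sale_status_py_alt
  rw [pvFold_eq_casc item hpre, pvA_eq_render_casc]
  rfl
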